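-- pv_equiv track=rewrite | github.com/KaimingTao/computing-mass | Data analysis/Table data/contigency_table/contigency_table.py | calc_contigency_table
-- ===== SOURCE A (Python) =====
-- def calc_contigency_table(listA, listB):
--
--     match_list = list(zip(listA, listB))
--
--     tt = [
--         1
--         for i, j in match_list
--         if i and j
--     ]
--
--     tf = [
--         1
--         for i, j in match_list
--         if i and not j
--     ]
--
--     ft = [
--         1
--         for i, j in match_list
--         if not i and j
--     ]
--
--     ff = [
--         1
--         for i, j in match_list
--         if not i and not j
--     ]
--
--     return {
--         'TT': len(tt),
--         'TF': len(tf),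
--         'FT': len(ft),
--         'FF': len(ff),
--         'total': len(match_list)
--     }
-- ===== SOURCE B (Python) =====
-- def calc_contigency_table(listA, listB):
--     tt = tf = ft = ff = total = 0
--     for i, j in zip(listA, listB):
--         if i and j:
--             tt += 1
--         elif i:
--             tf += 1
--         elif j:
--             ft += 1
--         else:
--             ff += 1
--         total += 1
--     return {'TT': tt, 'TF': tf, 'FT': ft, 'FF': ff, 'total': total}
-- ===== Notes on version B (the rewrite author's own statement) =====
-- stated objective: simpler
-- what changed: Replaces four separate comprehension scans over the zipped list (plus four temporary lists of 1s) with a single fused pass maintaining four counters and a total.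
import Mathlib
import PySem

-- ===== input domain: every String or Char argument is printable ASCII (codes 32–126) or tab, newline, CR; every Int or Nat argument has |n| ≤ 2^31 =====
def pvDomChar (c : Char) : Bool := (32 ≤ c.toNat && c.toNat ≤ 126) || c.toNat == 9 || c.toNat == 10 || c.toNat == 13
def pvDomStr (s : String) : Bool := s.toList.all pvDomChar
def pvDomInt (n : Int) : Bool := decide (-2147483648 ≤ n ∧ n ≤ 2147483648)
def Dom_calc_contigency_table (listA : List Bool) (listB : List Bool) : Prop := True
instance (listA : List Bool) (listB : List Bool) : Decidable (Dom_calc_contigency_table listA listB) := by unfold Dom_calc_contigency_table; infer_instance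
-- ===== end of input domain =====

-- B fuses A's four comprehension scans into one pass with four counters (objective: simpler).

-- ===== PORT A =====
def calc_contigency_table (listA : List Bool) (listB : List Bool) : List (String × Int) :=
  let match_list := listA.zip listB
  let tt := (match_list.filter (fun p => p.1 && p.2)).map (fun _ => (1 : Int))
  let tf := (match_list.filter (fun p => p.1 && !p.2)).map (fun _ => (1 : Int))
  let ft := (match_list.filter (fun p => !p.1 && p.2)).map (fun _ => (1 : Int))
  let ff := (match_list.filter (fun p => !p.1 && !p.2)).map (fun _ => (1 : Int))
  [("TT", (tt.length : Int)), ("TF", (tf.length : Int)), ("FT", (ft.length : Int)),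
   ("FF", (ff.length : Int)), ("total", (match_list.length : Int))]

-- ===== PORT B =====
def pvStepB (acc : Int × Int × Int × Int × Int) (p : Bool × Bool) : Int × Int × Int × Int × Int :=
  let (tt, tf, ft, ff, total) := acc
  if p.1 && p.2 then (tt + 1, tf, ft, ff, total + 1)
  else if p.1 then (tt, tf + 1, ft, ff, total + 1)
  else if p.2 then (tt, tf, ft + 1, ff, total + 1)
  else (tt, tf, ft, ff + 1, total + 1)

def calc_contigency_table_alt (listA : List Bool) (listB : List Bool) : List (String × Int) :=
  let s := (listA.zip listB).foldl pvStepB (0, 0, 0, 0, 0)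
  [("TT", s.1), ("TF", s.2.1), ("FT", s.2.2.1), ("FF", s.2.2.2.1), ("total", s.2.2.2.2)]

-- ===== PRECONDITION & SPEC =====
def Spec_calc_contigency_table (listA : List Bool) (listB : List Bool) (out : List (String × Int)) : Prop := out = calc_contigency_table_alt listA listB
instance (listA : List Bool) (listB : List Bool) (out : List (String × Int)) : Decidable (Spec_calc_contigency_table listA listB out) := by unfold Spec_calc_contigency_table; infer_instance

-- ===== CLAIM (what is proved, stated in full; the proofs are below) =====
def Claim_equal_calc_contigency_table : Prop := ∀ (listA : List Bool) (listB : List Bool), Dom_calc_contigency_table listA listB → Spec_calc_contigency_table listA listB (calc_contigency_table listA listB)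

-- ===== LEMMAS AND PROOFS =====
theorem pvFoldB_counts (l : List (Bool × Bool)) (tt tf ft ff total : Int) :
    l.foldl pvStepB (tt, tf, ft, ff, total) =
      (tt + (l.countP (fun p => p.1 && p.2) : Int),
       tf + (l.countP (fun p => p.1 && !p.2) : Int),
       ft + (l.countP (fun p => !p.1 && p.2) : Int),
       ff + (l.countP (fun p => !p.1 && !p.2) : Int),
       total + (l.length : Int)) := by
  induction l generalizing tt tf ft ff total with
  | nil => simp [List.countP]
  | cons h t ih =>
    obtain ⟨a, b⟩ := h
    cases a <;> cases b <;>
      simp [pvStepB, ih, List.countP_cons] <;> omega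

-- ===== VERDICT (by name: the statement is the Claim_ definition above) =====
theorem calc_contigency_table_spec : Claim_equal_calc_contigency_table := by
  intro listA listB _
  show _ = _
  simp [calc_contigency_table, calc_contigency_table_alt, pvFoldB_counts,
    List.countP_eq_length_filter]
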